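-- pv_equiv track=rewrite | github.com/M-Chirag/Python-DSA | dfs_adjList.py | buildAdjList
-- ===== SOURCE A (Python) =====
-- def buildAdjList(edges):
--
--     adjList = {}
--
--     for src, dst in edges:
--         if src not in adjList:
--             adjList[src] = []
--         if dst not in adjList:
--             adjList[dst] = []
--         adjList[src].append(dst)
--     return adjList
--
-- edges = [["A", "B"], ["B", "C"], ["B", "E"], ["C", "E"], ["E", "D"]]
--
-- adjList = buildAdjList(edges)
-- ===== SOURCE B (Python) =====
-- def buildAdjList(edges):
--     # Group-by via per-key scan: list the distinct nodes once, then for each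
--     # node collect its out-neighbours by a fresh comprehension over edges.
--     nodes = dict.fromkeys(node for edge in edges for node in edge)
--     return {node: [dst for src, dst in edges if src == node] for node in nodes}
-- ===== Notes on version B (the rewrite author's own statement) =====
-- stated objective: alternative
-- what changed: Replaces A's single incremental pass that mutates a dict of lists (conditional key inserts plus append per edge) by a group-by: compute the distinct nodes once with dict.fromkeys, then build each node's neighbour list from scratch with a per-node comprehension scan over all edges; no list is ever appended to.
import Mathlib
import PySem

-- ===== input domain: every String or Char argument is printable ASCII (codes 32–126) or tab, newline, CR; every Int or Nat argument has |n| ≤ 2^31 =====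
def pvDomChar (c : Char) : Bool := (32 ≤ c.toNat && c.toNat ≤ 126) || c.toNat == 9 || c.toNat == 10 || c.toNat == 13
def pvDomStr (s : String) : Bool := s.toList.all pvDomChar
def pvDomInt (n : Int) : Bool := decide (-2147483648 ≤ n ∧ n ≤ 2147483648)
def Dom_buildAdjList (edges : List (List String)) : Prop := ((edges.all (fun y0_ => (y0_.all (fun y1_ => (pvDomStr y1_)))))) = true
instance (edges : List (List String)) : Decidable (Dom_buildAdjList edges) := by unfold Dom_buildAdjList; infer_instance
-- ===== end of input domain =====

-- B replaces A's incremental dict-of-lists build by a group-by: distinct nodes once, then a per-node scan of edges; objective: alternative (no speed claim).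


-- ===== PORT A =====
-- one iteration of A's loop: conditional key inserts for src and dst, then adjList[src].append(dst)
def pvAStep (d : PySem.Dict String (List String)) (e : List String) : PySem.Dict String (List String) :=
  match e with
  | [src, dst] =>
    let d1 := if d.contains src then d else d.insert src []
    let d2 := if d1.contains dst then d1 else d1.insert dst []
    d2.modify src [] (fun l => l ++ [dst])
  | _ => d  -- Python raises ValueError here (unpacking); excluded by Pre_

def buildAdjList (edges : List (List String)) : List (String × List String) :=
  (edges.foldl pvAStep (PySem.Dict.empty : PySem.Dict String (List String))).items

-- ===== PORT B =====
-- Source B's generator 'node for edge in edges for node in edge' fed to dict.fromkeys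
def pvBNodes (edges : List (List String)) : List String :=
  PySem.List.dedup (edges.flatMap id)

-- Source B's comprehension '[dst for src, dst in edges if src == node]'
def pvBCollect (edges : List (List String)) (node : String) : List String :=
  edges.flatMap (fun e => match e with
    | [src, dst] => if src = node then [dst] else []
    | _ => [])  -- Python raises ValueError here (unpacking); excluded by Pre_

def buildAdjList_alt (edges : List (List String)) : List (String × List String) :=
  (pvBNodes edges).map (fun node => (node, pvBCollect edges node))

-- ===== PRECONDITION & SPEC =====
-- Pre_ excludes edges that are not pairs: there 'for src, dst in edges' raises ValueError in both A and B.
def Pre_buildAdjList (edges : List (List String)) : Prop := ∀ e ∈ edges, e.length = 2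
instance (edges : List (List String)) : Decidable (Pre_buildAdjList edges) := by unfold Pre_buildAdjList; infer_instance

def pvWitness_buildAdjList : List (List String) := [["A", "B"], ["B", "C"], ["B", "E"], ["C", "E"], ["E", "D"]]

def Spec_buildAdjList (edges : List (List String)) (out : List (String × List String)) : Prop := out = buildAdjList_alt edges
instance (edges : List (List String)) (out : List (String × List String)) : Decidable (Spec_buildAdjList edges out) := by unfold Spec_buildAdjList; infer_instance

-- ===== CLAIM (what is proved, stated in full; the proofs are below) =====
def Claim_equal_buildAdjList : Prop := ∀ (edges : List (List String)), Dom_buildAdjList edges → Pre_buildAdjList edges → Spec_buildAdjList edges (buildAdjList edges)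

-- ===== LEMMAS AND PROOFS =====

theorem pvBCollect_cons (k s t : String) (es : List (List String)) :
    pvBCollect ([s, t] :: es) k = (if s = k then [t] else []) ++ pvBCollect es k := by
  simp [pvBCollect]

theorem pvLen2 (e : List String) (h : e.length = 2) : ∃ s t, e = [s, t] := by
  match e, h with
  | [s, t], _ => exact ⟨s, t, rfl⟩

-- a conditional insert of an empty list never changes getD · []
theorem pvCondInsert_getD (d : PySem.Dict String (List String)) (n k : String) :
    (if d.contains n then d else d.insert n []).getD k [] = d.getD k [] := by
  split_ifs with h
  · rfl
  · rw [PySem.Dict.getD_insert]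
    split_ifs with hk
    · subst hk
      exact (PySem.Dict.getD_of_not_contains d [] (by simpa using h)).symm
    · rfl

theorem pvCondInsert_keys (d : PySem.Dict String (List String)) (n : String) :
    (if d.contains n then d else d.insert n []).keys = PySem.Set.add d.keys n := by
  split_ifs with h
  · rw [PySem.Set.add_of_mem ((PySem.Dict.contains_iff_mem_keys d n).mp h)]
  · rw [PySem.Dict.keys_insert_of_not_contains d [] (by simpa using h),
      PySem.Set.add_of_not_mem]
    intro hm
    exact h ((PySem.Dict.contains_iff_mem_keys d n).mpr hm)

-- step form of A: getD
theorem pvAStep_getD (d : PySem.Dict String (List String)) (s t k : String) :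
    (pvAStep d [s, t]).getD k [] = d.getD k [] ++ (if s = k then [t] else []) := by
  simp only [pvAStep]
  rw [PySem.Dict.getD_modify]
  by_cases h : k = s
  · subst h; rw [if_pos rfl, pvCondInsert_getD, pvCondInsert_getD, if_pos rfl]
  · rw [if_neg h, pvCondInsert_getD, pvCondInsert_getD, if_neg (fun hs : s = k => h hs.symm), List.append_nil]

-- step form of A: keys
theorem pvAStep_keys (d : PySem.Dict String (List String)) (s t : String) :
    (pvAStep d [s, t]).keys = PySem.Set.add (PySem.Set.add d.keys s) t := by
  simp only [pvAStep]
  rw [PySem.Dict.keys_modify, PySem.Dict.keys_insert_of_contains, pvCondInsert_keys, pvCondInsert_keys]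
  rw [PySem.Dict.contains_eq_decide_mem_keys, pvCondInsert_keys, pvCondInsert_keys]
  simp [PySem.Set.mem_add]

-- A's fold: values
theorem pvA_getD (es : List (List String)) (d : PySem.Dict String (List String))
    (hP : ∀ e ∈ es, e.length = 2) (k : String) :
    (es.foldl pvAStep d).getD k [] = d.getD k [] ++ pvBCollect es k := by
  induction es generalizing d with
  | nil => simp [pvBCollect]
  | cons e es ih =>
    obtain ⟨s, t, rfl⟩ := pvLen2 e (hP e (List.mem_cons_self))
    rw [List.foldl_cons, ih _ (fun e he => hP e (List.mem_cons_of_mem _ he)),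
      pvAStep_getD, pvBCollect_cons, List.append_assoc]

-- A's fold: keys
theorem pvA_keys (es : List (List String)) (d : PySem.Dict String (List String))
    (hP : ∀ e ∈ es, e.length = 2) :
    (es.foldl pvAStep d).keys = PySem.Set.update d.keys (es.flatMap id) := by
  induction es generalizing d with
  | nil => simp [PySem.Set.update]
  | cons e es ih =>
    obtain ⟨s, t, rfl⟩ := pvLen2 e (hP e (List.mem_cons_self))
    rw [List.foldl_cons, ih _ (fun e he => hP e (List.mem_cons_of_mem _ he)), pvAStep_keys]
    simp [PySem.Set.update_cons]

-- ===== VERDICT (by name: the statement is the Claim_ definition above) =====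
theorem buildAdjList_spec : Claim_equal_buildAdjList := by
  intro edges _ hPre
  unfold Spec_buildAdjList buildAdjList buildAdjList_alt
  have hPre' : ∀ e ∈ edges, e.length = 2 := hPre
  have hnodupA : (edges.foldl pvAStep (PySem.Dict.empty : PySem.Dict String (List String))).keys.Nodup := by
    rw [pvA_keys edges _ hPre']
    exact PySem.Set.nodup_update _ _ (by simp [PySem.Dict.keys_empty])
  rw [PySem.Dict.items_eq_map_keys _ hnodupA ([] : List String)]
  rw [pvA_keys edges _ hPre']
  have hkeys : PySem.Set.update (PySem.Dict.empty : PySem.Dict String (List String)).keys (edges.flatMap id)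
      = pvBNodes edges := by
    rw [PySem.Dict.keys_empty]
    simp [pvBNodes, PySem.Set.update, PySem.Set.ofList_eq_foldl]
  rw [hkeys]
  apply List.map_congr_left
  intro x _
  rw [pvA_getD edges _ hPre']
  simp [PySem.Dict.getD_empty]
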